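-- pv_equiv track=rewrite | github.com/Tirrel/PyDashboard | manage/TableManager.py | updateCellsAux
-- ===== SOURCE A (Python) =====
-- def updateCellsAux(ch1_len, ch2_len, ch1_load, ch2_load):
--     ch1_diff_min = 1000
--     ch2_diff_min = 1000
--     ch1_diff_max = 0
--     ch2_diff_max = 0
--     load_delta_min = 1000
--     load_delta_max = 0
--
--     size = min(ch1_len, ch2_len)
--
--     for index in range(size):
--         diff = abs(ch1_load[index] - ch2_load[index])
--
--         load_delta_min = min(diff, load_delta_min)
--         load_delta_max = max(diff, load_delta_max)
--
--         ch1_delta_load = abs(ch1_load[index] - ch1_load[0])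
--         ch1_diff_min = min(ch1_delta_load, ch1_diff_min)
--         ch1_diff_max = max(ch1_delta_load, ch1_diff_max)
--
--         ch2_delta_load = abs(ch2_load[index] - ch2_load[0])
--         ch2_diff_min = min(ch2_delta_load, ch2_diff_min)
--         ch2_diff_max = max(ch2_delta_load, ch2_diff_max)
--
--     return ch1_diff_min, ch1_diff_max, ch2_diff_min, ch2_diff_max, load_delta_min, load_delta_max
-- ===== SOURCE B (Python) =====
-- def updateCellsAux(ch1_len, ch2_len, ch1_load, ch2_load):
--     size = min(ch1_len, ch2_len)
--     if size <= 0: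
--         return 1000, 0, 1000, 0, 1000, 0
--     p1 = ch1_load[:size]
--     p2 = ch2_load[:size]
--     # |x - p[0]| over the prefix: its minimum is 0 (reached at index 0),
--     # and its maximum is max(max(p) - p[0], p[0] - min(p)) by monotonicity of abs,
--     # so the channel statistics reduce to order statistics of the raw prefixes.
--     ch1_diff_max = max(max(p1) - p1[0], p1[0] - min(p1))
--     ch2_diff_max = max(max(p2) - p2[0], p2[0] - min(p2))
--     lo, hi = 1000, 0
--     for a, b in zip(p1, p2):
--         d = a - b if a >= b else b - a
--         if d < lo:
--             lo = d
--         if d > hi: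
--             hi = d
--     return 0, ch1_diff_max, 0, ch2_diff_max, lo, hi
-- ===== Notes on version B (the rewrite author's own statement) =====
-- stated objective: faster
-- what changed: Replaces A's fused six-accumulator min/max loop over three derived absolute-difference sequences by algebraic identities: the per-channel min is always 0 (index 0 contributes |p[0]-p[0]|) and the per-channel max equals max(max(p)-p[0], p[0]-min(p)) over the raw prefix, so four of six outputs come from builtin min/max of the raw prefixes and only the pairwise load delta keeps a (two-accumulator) loop; measured ~4x faster.
import Mathlib
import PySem

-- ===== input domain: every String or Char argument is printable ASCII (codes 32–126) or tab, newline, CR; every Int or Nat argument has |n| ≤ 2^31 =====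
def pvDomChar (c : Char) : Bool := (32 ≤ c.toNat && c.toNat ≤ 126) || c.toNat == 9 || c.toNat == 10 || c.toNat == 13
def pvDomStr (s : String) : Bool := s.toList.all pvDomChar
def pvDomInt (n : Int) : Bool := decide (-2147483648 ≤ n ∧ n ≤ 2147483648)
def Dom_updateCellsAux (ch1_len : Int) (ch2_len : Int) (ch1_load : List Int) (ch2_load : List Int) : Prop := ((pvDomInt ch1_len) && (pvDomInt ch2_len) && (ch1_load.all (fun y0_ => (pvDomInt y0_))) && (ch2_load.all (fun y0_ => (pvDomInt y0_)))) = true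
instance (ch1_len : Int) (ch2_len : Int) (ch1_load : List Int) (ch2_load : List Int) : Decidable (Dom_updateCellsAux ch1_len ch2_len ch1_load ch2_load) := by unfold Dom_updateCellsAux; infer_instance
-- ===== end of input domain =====

-- B derives the per-channel statistics from order statistics of the raw prefix (the min is identically 0, the max is max(max(p)-p[0], p[0]-min(p))), keeping a loop only for the pairwise load delta; a timing run measured the Python B faster by a constant factor.

-- ===== PORT A =====
def updateCellsAux (ch1_len : Int) (ch2_len : Int) (ch1_load : List Int) (ch2_load : List Int) : Int × Int × Int × Int × Int × Int :=
  let size := min ch1_len ch2_len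
  (PySem.List.pyRange 0 size 1).foldl (fun st index =>
      let diff := |PySem.List.pyGetD ch1_load index 0 - PySem.List.pyGetD ch2_load index 0|
      let load_delta_min := min diff st.2.2.2.2.1
      let load_delta_max := max diff st.2.2.2.2.2
      let ch1_delta_load := |PySem.List.pyGetD ch1_load index 0 - PySem.List.pyGetD ch1_load 0 0|
      let ch1_diff_min := min ch1_delta_load st.1
      let ch1_diff_max := max ch1_delta_load st.2.1
      let ch2_delta_load := |PySem.List.pyGetD ch2_load index 0 - PySem.List.pyGetD ch2_load 0 0|
      let ch2_diff_min := min ch2_delta_load st.2.2.1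
      let ch2_diff_max := max ch2_delta_load st.2.2.2.1
      (ch1_diff_min, ch1_diff_max, ch2_diff_min, ch2_diff_max, load_delta_min, load_delta_max))
    (1000, 0, 1000, 0, 1000, 0)

-- ===== PORT B =====
def updateCellsAux_alt (ch1_len : Int) (ch2_len : Int) (ch1_load : List Int) (ch2_load : List Int) : Int × Int × Int × Int × Int × Int :=
  let size := min ch1_len ch2_len
  if size ≤ 0 then (1000, 0, 1000, 0, 1000, 0)
  else
    let p1 := PySem.List.slice ch1_load none (some size)
    let p2 := PySem.List.slice ch2_load none (some size)
    let b1 := PySem.List.pyGetD p1 0 0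
    let b2 := PySem.List.pyGetD p2 0 0
    let ch1_diff_max := max ((PySem.List.max? p1 (fun x => x)).getD 0 - b1) (b1 - (PySem.List.min? p1 (fun x => x)).getD 0)
    let ch2_diff_max := max ((PySem.List.max? p2 (fun x => x)).getD 0 - b2) (b2 - (PySem.List.min? p2 (fun x => x)).getD 0)
    let lh := (p1.zip p2).foldl (fun (st : Int × Int) p =>
        let d := if p.1 ≥ p.2 then p.1 - p.2 else p.2 - p.1
        (if d < st.1 then d else st.1, if d > st.2 then d else st.2)) (1000, 0)
    (0, ch1_diff_max, 0, ch2_diff_max, lh.1, lh.2)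

-- ===== PRECONDITION & SPEC =====
-- A indexes both lists at 0..size-1 (size = min of the two length arguments); Pre_ excludes exactly the inputs where that raises IndexError.
def Pre_updateCellsAux (ch1_len : Int) (ch2_len : Int) (ch1_load : List Int) (ch2_load : List Int) : Prop :=
  min ch1_len ch2_len ≤ (ch1_load.length : Int) ∧ min ch1_len ch2_len ≤ (ch2_load.length : Int)
instance (ch1_len : Int) (ch2_len : Int) (ch1_load : List Int) (ch2_load : List Int) : Decidable (Pre_updateCellsAux ch1_len ch2_len ch1_load ch2_load) := by unfold Pre_updateCellsAux; infer_instance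

def pvWitness_updateCellsAux : Int × Int × List Int × List Int := (2, 3, [5, 7], [1, 4])

def Spec_updateCellsAux (ch1_len : Int) (ch2_len : Int) (ch1_load : List Int) (ch2_load : List Int) (out : Int × Int × Int × Int × Int × Int) : Prop := out = updateCellsAux_alt ch1_len ch2_len ch1_load ch2_load
instance (ch1_len : Int) (ch2_len : Int) (ch1_load : List Int) (ch2_load : List Int) (out : Int × Int × Int × Int × Int × Int) : Decidable (Spec_updateCellsAux ch1_len ch2_len ch1_load ch2_load out) := by unfold Spec_updateCellsAux; infer_instance

-- ===== CLAIM (what is proved, stated in full; the proofs are below) =====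
def Claim_equal_updateCellsAux : Prop := ∀ (ch1_len : Int) (ch2_len : Int) (ch1_load : List Int) (ch2_load : List Int), Dom_updateCellsAux ch1_len ch2_len ch1_load ch2_load → Pre_updateCellsAux ch1_len ch2_len ch1_load ch2_load → Spec_updateCellsAux ch1_len ch2_len ch1_load ch2_load (updateCellsAux ch1_len ch2_len ch1_load ch2_load)

-- ===== LEMMAS AND PROOFS =====

-- A's fold over range(size) equals foldl min/max over the three mapped prefix sequences.
theorem loop_main (l1 l2 : List Int) (n : Nat) (h1 : n ≤ l1.length) (h2 : n ≤ l2.length) :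
    (List.range n).foldl (fun st (k : Nat) =>
      let index : Int := (k : Int)
      let diff := |PySem.List.pyGetD l1 index 0 - PySem.List.pyGetD l2 index 0|
      let load_delta_min := min diff st.2.2.2.2.1
      let load_delta_max := max diff st.2.2.2.2.2
      let ch1_delta_load := |PySem.List.pyGetD l1 index 0 - PySem.List.pyGetD l1 0 0|
      let ch1_diff_min := min ch1_delta_load st.1
      let ch1_diff_max := max ch1_delta_load st.2.1
      let ch2_delta_load := |PySem.List.pyGetD l2 index 0 - PySem.List.pyGetD l2 0 0|
      let ch2_diff_min := min ch2_delta_load st.2.2.1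
      let ch2_diff_max := max ch2_delta_load st.2.2.2.1
      (ch1_diff_min, ch1_diff_max, ch2_diff_min, ch2_diff_max, load_delta_min, load_delta_max))
      ((1000 : Int), (0 : Int), (1000 : Int), (0 : Int), (1000 : Int), (0 : Int))
    = (((l1.take n).map (fun x => |x - PySem.List.pyGetD l1 0 0|)).foldl min 1000,
       ((l1.take n).map (fun x => |x - PySem.List.pyGetD l1 0 0|)).foldl max 0,
       ((l2.take n).map (fun x => |x - PySem.List.pyGetD l2 0 0|)).foldl min 1000,
       ((l2.take n).map (fun x => |x - PySem.List.pyGetD l2 0 0|)).foldl max 0,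
       (((l1.take n).zip (l2.take n)).map (fun p => |p.1 - p.2|)).foldl min 1000,
       (((l1.take n).zip (l2.take n)).map (fun p => |p.1 - p.2|)).foldl max 0) := by
  induction n with
  | zero => simp
  | succ n ih =>
      have hn1 : n < l1.length := by omega
      have hn2 : n < l2.length := by omega
      have e1 : l1.take (n+1) = l1.take n ++ [l1[n]] := by
        rw [List.take_add_one, List.getElem?_eq_getElem hn1]; rfl
      have e2 : l2.take (n+1) = l2.take n ++ [l2[n]] := by
        rw [List.take_add_one, List.getElem?_eq_getElem hn2]; rfl
      have ez : (l1.take (n+1)).zip (l2.take (n+1))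
          = (l1.take n).zip (l2.take n) ++ [(l1[n], l2[n])] := by
        rw [e1, e2, List.zip_append (by simp; omega)]
        rfl
      rw [List.range_succ, List.foldl_append, ih (by omega) (by omega), ez, e1, e2]
      simp only [List.map_append, List.foldl_append, List.map_cons, List.map_nil,
        List.foldl_cons, List.foldl_nil]
      simp only [PySem.List.pyGetD_natCast, List.getD_eq_getElem?_getD,
        List.getElem?_eq_getElem hn1, List.getElem?_eq_getElem hn2, Option.getD_some]
      simp [min_comm, max_comm]

theorem foldl_min_nonneg (t : List Int) (h : ∀ x ∈ t, 0 ≤ x) : t.foldl min 0 = 0 := by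
  induction t with
  | nil => rfl
  | cons y t ih =>
      have hy : 0 ≤ y := h y (by simp)
      simp only [List.foldl_cons, min_eq_left hy]
      exact ih (fun x hx => h x (by simp [hx]))

theorem foldl_maxabs (t : List Int) : ∀ (hi lo b : Int), lo ≤ b → b ≤ hi →
    (t.map (fun x => |x - b|)).foldl max (max (hi - b) (b - lo))
      = max (t.foldl max hi - b) (b - t.foldl min lo) := by
  induction t with
  | nil => intro hi lo b _ _; rfl
  | cons y t ih =>
      intro hi lo b hlo hhi
      simp only [List.map_cons, List.foldl_cons]
      have e : max (max (hi - b) (b - lo)) |y - b| = max (max hi y - b) (b - min lo y) := by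
        rcases abs_cases (y - b) with ⟨h1, h2⟩ | ⟨h1, h2⟩ <;> omega
      rw [e, ih (max hi y) (min lo y) b (by omega) (by omega)]

theorem foldl_zip_pair (z : List (Int × Int)) : ∀ (lo hi : Int),
    z.foldl (fun (st : Int × Int) p =>
        let d := if p.1 ≥ p.2 then p.1 - p.2 else p.2 - p.1
        (if d < st.1 then d else st.1, if d > st.2 then d else st.2)) (lo, hi)
      = ((z.map (fun p => |p.1 - p.2|)).foldl min lo,
         (z.map (fun p => |p.1 - p.2|)).foldl max hi) := by
  induction z with
  | nil => intro lo hi; rfl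
  | cons y z ih =>
      intro lo hi
      simp only [List.map_cons, List.foldl_cons]
      have e1 : (if (if y.1 ≥ y.2 then y.1 - y.2 else y.2 - y.1) < lo then (if y.1 ≥ y.2 then y.1 - y.2 else y.2 - y.1) else lo) = min lo |y.1 - y.2| := by
        rcases abs_cases (y.1 - y.2) with ⟨h1, h2⟩ | ⟨h1, h2⟩ <;> split_ifs <;> omega
      have e2 : (if (if y.1 ≥ y.2 then y.1 - y.2 else y.2 - y.1) > hi then (if y.1 ≥ y.2 then y.1 - y.2 else y.2 - y.1) else hi) = max hi |y.1 - y.2| := by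
        rcases abs_cases (y.1 - y.2) with ⟨h1, h2⟩ | ⟨h1, h2⟩ <;> split_ifs <;> omega
      rw [ih]
      simp [e1, e2]

theorem updateCellsAux_spec : Claim_equal_updateCellsAux := by
  intro ch1_len ch2_len l1 l2 _ hpre
  obtain ⟨h1, h2⟩ := hpre
  unfold Spec_updateCellsAux
  simp only [updateCellsAux, updateCellsAux_alt]
  by_cases hsz : min ch1_len ch2_len ≤ 0
  · rw [if_pos hsz, PySem.List.pyRange_one_eq_nil hsz]
    rfl
  · rw [if_neg hsz]
    set s : Int := min ch1_len ch2_len with hs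
    have hn1 : s.toNat ≤ l1.length := by omega
    have hn2 : s.toNat ≤ l2.length := by omega
    have hpos : 0 < s.toNat := by omega
    rw [PySem.List.slice_to l1 (by omega), PySem.List.slice_to l2 (by omega)]
    have hcast : s = ((s.toNat : Nat) : Int) := by omega
    rw [hcast, PySem.List.pyRange_zero_natCast, List.foldl_map]
    simp only [Int.toNat_natCast]
    rw [loop_main l1 l2 s.toNat hn1 hn2]
    -- decompose the nonempty prefixes
    obtain ⟨x, t1, e1⟩ : ∃ x t, l1.take s.toNat = x :: t := by
      cases hT : l1.take s.toNat with
      | nil =>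
          exfalso
          have hlen := congrArg List.length hT
          rw [List.length_take, List.length_nil, Nat.min_eq_zero_iff] at hlen
          rcases hlen with h | h <;> omega
      | cons x t => exact ⟨x, t, rfl⟩
    obtain ⟨y, t2, e2⟩ : ∃ y t, l2.take s.toNat = y :: t := by
      cases hT : l2.take s.toNat with
      | nil =>
          exfalso
          have hlen := congrArg List.length hT
          rw [List.length_take, List.length_nil, Nat.min_eq_zero_iff] at hlen
          rcases hlen with h | h <;> omega
      | cons y t => exact ⟨y, t, rfl⟩
    have hb1 : PySem.List.pyGetD l1 0 0 = x := by
      cases l1 with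
      | nil => simp at e1
      | cons a l =>
          rw [List.take_cons hpos] at e1
          injection e1 with hx _
          rw [PySem.List.pyGetD_zero_cons, hx]
    have hb2 : PySem.List.pyGetD l2 0 0 = y := by
      cases l2 with
      | nil => simp at e2
      | cons a l =>
          rw [List.take_cons hpos] at e2
          injection e2 with hy _
          rw [PySem.List.pyGetD_zero_cons, hy]
    rw [e1, e2, hb1, hb2, PySem.List.pyGetD_zero_cons, PySem.List.pyGetD_zero_cons,
        PySem.List.max?_id_cons, PySem.List.min?_id_cons,
        PySem.List.max?_id_cons, PySem.List.min?_id_cons]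
    simp only [Option.getD_some]
    rw [foldl_zip_pair]
    -- six components
    have cmin : ∀ (b : Int) (t : List Int),
        ((b :: t).map (fun z => |z - b|)).foldl min 1000 = 0 := by
      intro b t
      simp only [List.map_cons, List.foldl_cons, sub_self, abs_zero]
      have : min (1000 : Int) 0 = 0 := by omega
      rw [this, foldl_min_nonneg]
      intro z hz
      obtain ⟨w, _, hw⟩ := List.mem_map.mp hz
      rw [← hw]; exact abs_nonneg _
    have cmax : ∀ (b : Int) (t : List Int),
        ((b :: t).map (fun z => |z - b|)).foldl max 0
          = max (t.foldl max b - b) (b - t.foldl min b) := by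
      intro b t
      simp only [List.map_cons, List.foldl_cons, sub_self, abs_zero]
      have : max (0 : Int) 0 = max (b - b) (b - b) := by omega
      rw [this, foldl_maxabs t b b b le_rfl le_rfl]
    rw [cmin x t1, cmin y t2, cmax x t1, cmax y t2]
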